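-- pv_equiv track=rewrite | github.com/lge0322/F2021_public | 15112-F21/Midterm2_Prep/s21.py | helper
-- ===== SOURCE A (Python) =====
-- def helper(L, compare):
--     if L ==[]:
--         return True
--
--     else:
--         if L[0] % 2 == 1:
--             return helper(L[1:], compare)
--         else:
--             if L[0] <= compare:
--                 return False
--             else:
--                 return helper(L[1:], L[0])
-- ===== SOURCE B (Python) =====
-- def helper(L, compare):
--     cur = compare
--     for x in L:
--         if x % 2 == 0:
--             if x <= cur:
--                 return False
--             cur = x
--     return True
-- ===== Notes on version B (the rewrite author's own statement) =====
-- stated objective: simpler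
-- what changed: Replaced the recursion that slices off the head with L[1:] at each step by a single iterative pass keeping a running compare variable.
import Mathlib
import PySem

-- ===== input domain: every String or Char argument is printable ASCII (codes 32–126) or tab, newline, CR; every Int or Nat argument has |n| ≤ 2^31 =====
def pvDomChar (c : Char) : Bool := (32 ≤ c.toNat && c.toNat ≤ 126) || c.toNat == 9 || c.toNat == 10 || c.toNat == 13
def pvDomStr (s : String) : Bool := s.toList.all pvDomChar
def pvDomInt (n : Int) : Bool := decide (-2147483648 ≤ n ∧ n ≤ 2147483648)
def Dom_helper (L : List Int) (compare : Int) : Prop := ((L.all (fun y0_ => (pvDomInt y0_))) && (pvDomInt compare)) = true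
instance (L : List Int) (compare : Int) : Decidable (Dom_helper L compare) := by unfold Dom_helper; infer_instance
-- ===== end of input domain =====

-- ===== PORT A =====
-- A: recursion on the list, skipping odd heads, updating compare on even heads
def helper (L : List Int) (compare : Int) : Bool :=
  match L with
  | [] => true
  | x :: rest =>
    if PySem.Int.mod x 2 = 1 then helper rest compare
    else if x ≤ compare then false
    else helper rest x

-- ===== PORT B =====
-- B (single iterative pass, no list slicing): a fold carrying (still_ok, cur);
-- once still_ok is false the loop body does nothing (Python's early return).
def helperAltStep (st : Bool × Int) (x : Int) : Bool × Int :=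
  if st.1 = false then st
  else if PySem.Int.mod x 2 = 0 then
    (if x ≤ st.2 then (false, st.2) else (true, x))
  else st

def helper_alt (L : List Int) (compare : Int) : Bool :=
  (L.foldl helperAltStep (true, compare)).1

-- ===== PRECONDITION & SPEC =====
def Spec_helper (L : List Int) (compare : Int) (out : Bool) : Prop := out = helper_alt L compare
instance (L : List Int) (compare : Int) (out : Bool) : Decidable (Spec_helper L compare out) := by unfold Spec_helper; infer_instance

-- ===== CLAIM (what is proved, stated in full; the proofs are below) =====
def Claim_equal_helper : Prop := ∀ (L : List Int) (compare : Int), Dom_helper L compare → Spec_helper L compare (helper L compare)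

-- ===== LEMMAS AND PROOFS =====

-- ===== VERDICT (by name: the statement is the Claim_ definition above) =====
lemma foldl_false (L : List Int) (c : Int) :
    L.foldl helperAltStep (false, c) = (false, c) := by
  induction L with
  | nil => rfl
  | cons x rest ih => simp [List.foldl, helperAltStep, ih]

lemma helper_eq (L : List Int) (compare : Int) :
    helper L compare = helper_alt L compare := by
  induction L generalizing compare with
  | nil => rfl
  | cons x rest ih =>
    have hf : PySem.Int.mod x 2 = x % 2 := by
      unfold PySem.Int.mod
      rw [Int.fmod_eq_emod]; norm_num
    have hm : x % 2 = 0 ∨ x % 2 = 1 := by omega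
    rcases hm with h | h
    · have hd : (2 : Int) ∣ x := Int.dvd_of_emod_eq_zero h
      by_cases hle : x ≤ compare
      · simp [helper, helper_alt, helperAltStep, h, hle, List.foldl, foldl_false]
      · simpa [helper, helper_alt, helperAltStep, hf, h, hd, hle, List.foldl] using ih x
    · have hd : ¬ (2 : Int) ∣ x := by omega
      simpa [helper, helper_alt, helperAltStep, hf, h, hd, List.foldl] using ih compare

theorem helper_spec : Claim_equal_helper := by
  intro L compare _
  unfold Spec_helper
  exact helper_eq L compare
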